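-- pv_equiv track=rewrite | github.com/bad1and/ML_Clusteringv_Vocabulary | graph/semantic_graph_builder.py | _select_vocabulary
-- ===== SOURCE A (Python) =====
-- from collections import Counter
--
-- def _select_vocabulary(words, min_freq=2, max_words=200):
--     """Берём не случайный set(words), а самые частотные слова в стабильном порядке."""
--     freq = Counter(words)
--     selected = [
--         word
--         for word, count in freq.most_common()
--         if count >= min_freq and len(word) > 2
--     ]
--     return selected[:max_words]
-- ===== SOURCE B (Python) =====
-- from collections import Counter
--
-- def _select_vocabulary(words, min_freq=2, max_words=200):
--     """Counting-sort by frequency: bucket words per count, then sweep counts downward."""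
--     freq = Counter(words)
--     max_count = max(freq.values(), default=0)
--     buckets = {}
--     for word, count in freq.items():
--         buckets.setdefault(count, []).append(word)
--     result = []
--     for count in range(max_count, max(min_freq, 1) - 1, -1):
--         for word in buckets.get(count, []):
--             if len(word) > 2:
--                 result.append(word)
--     return result[:max_words]
-- ===== Notes on version B (the rewrite author's own statement) =====
-- stated objective: alternative
-- what changed: Replaces Counter.most_common()'s comparison sort with a counting sort: words are bucketed by frequency in a dict, then the frequencies are swept downward from the maximum, which reproduces most_common's stable order without sorting.
import Mathlib
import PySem

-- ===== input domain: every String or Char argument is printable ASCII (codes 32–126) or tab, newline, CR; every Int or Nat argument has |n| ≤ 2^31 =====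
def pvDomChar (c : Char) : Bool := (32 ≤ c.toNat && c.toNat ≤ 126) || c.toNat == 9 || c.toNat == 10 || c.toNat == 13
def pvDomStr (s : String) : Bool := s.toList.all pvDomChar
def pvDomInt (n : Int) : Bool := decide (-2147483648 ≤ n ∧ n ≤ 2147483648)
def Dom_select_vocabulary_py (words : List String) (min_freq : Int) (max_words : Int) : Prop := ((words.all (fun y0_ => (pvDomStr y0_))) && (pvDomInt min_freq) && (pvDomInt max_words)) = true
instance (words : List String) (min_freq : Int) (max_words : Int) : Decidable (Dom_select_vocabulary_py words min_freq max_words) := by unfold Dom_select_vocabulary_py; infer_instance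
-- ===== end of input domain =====

-- B replaces most_common()'s comparison sort by a counting sort: bucket the counter's
-- words per frequency, then sweep the frequencies downward (objective: alternative).

-- ===== PORT A =====
-- freq = Counter(words); most_common() = sorted(items, key=itemgetter(1), reverse=True);
-- the comprehension keeps word where count >= min_freq and len(word) > 2; then selected[:max_words].
def select_vocabulary_py (words : List String) (min_freq : Int) (max_words : Int) : List String :=
  let freq := PySem.Dict.counter words
  let selected :=
    ((PySem.List.sorted freq.items (fun p => p.2) true).filter
        (fun p => decide (min_freq ≤ p.2) && decide (2 < PySem.Str.len p.1))).map (fun p => p.1)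
  PySem.List.slice selected none (some max_words)

-- ===== PORT B =====
-- freq = Counter(words); max_count = max(freq.values(), default=0); buckets: dict count -> list of
-- words (setdefault(...).append(word) = insert with the word appended); sweep
-- range(max_count, max(min_freq,1)-1, -1) appending the bucket's words of length > 2; result[:max_words].
def select_vocabulary_py_alt (words : List String) (min_freq : Int) (max_words : Int) : List String :=
  let freq := PySem.Dict.counter words
  let max_count := PySem.List.maxD freq.values (fun v => v) 0
  let buckets := freq.items.foldl
      (fun (d : PySem.Dict Int (List String)) p => d.insert p.2 (d.getD p.2 [] ++ [p.1]))
      PySem.Dict.empty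
  let result := (PySem.List.pyRange max_count (max min_freq 1 - 1) (-1)).foldl
      (fun acc c => acc ++ (buckets.getD c []).filter (fun w => decide (2 < PySem.Str.len w))) []
  PySem.List.slice result none (some max_words)

-- ===== PRECONDITION & SPEC =====
def Spec_select_vocabulary_py (words : List String) (min_freq : Int) (max_words : Int) (out : List String) : Prop := out = select_vocabulary_py_alt words min_freq max_words
instance (words : List String) (min_freq : Int) (max_words : Int) (out : List String) : Decidable (Spec_select_vocabulary_py words min_freq max_words out) := by unfold Spec_select_vocabulary_py; infer_instance

-- ===== CLAIM (what is proved, stated in full; the proofs are below) =====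
def Claim_equal_select_vocabulary_py : Prop := ∀ (words : List String) (min_freq : Int) (max_words : Int), Dom_select_vocabulary_py words min_freq max_words → Spec_select_vocabulary_py words min_freq max_words (select_vocabulary_py words min_freq max_words)

-- ===== LEMMAS AND PROOFS =====

-- insertBy step equation
lemma insertBy_cons {α : Type} (bef : α → α → Bool) (x y : α) (ys : List α) :
    PySem.List.insertBy bef x (y :: ys) =
      if bef x y then x :: y :: ys else y :: PySem.List.insertBy bef x ys := by
  simp [PySem.List.insertBy]

-- skip a prefix none of whose elements x goes before
lemma insertBy_prefix {α : Type} (bef : α → α → Bool) (x : α) (u v : List α)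
    (h : ∀ e ∈ u, bef x e = false) :
    PySem.List.insertBy bef x (u ++ v) = u ++ PySem.List.insertBy bef x v := by
  induction u with
  | nil => simp
  | cons y t ih =>
      have hy : bef x y = false := h y (by simp)
      rw [List.cons_append, insertBy_cons, hy, ih (fun e he => h e (by simp [he]))]
      simp

-- x goes before every element
lemma insertBy_all_before {α : Type} (bef : α → α → Bool) (x : α) (v : List α)
    (h : ∀ e ∈ v, bef x e = true) :
    PySem.List.insertBy bef x v = x :: v := by
  cases v with
  | nil => rfl
  | cons y t => simp only [insertBy_cons, h y (by simp), if_true]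

-- the descending count list [n, n-1, ..., 1]
def dl : Nat → List Int
  | 0 => []
  | n + 1 => ((n : Int) + 1) :: dl n

lemma mem_dl (n : Nat) (c : Int) : c ∈ dl n ↔ 1 ≤ c ∧ c ≤ (n : Int) := by
  induction n with
  | zero => simp [dl]; omega
  | succ m ih => simp [dl, ih]; omega

lemma dl_split (M k : Nat) (h : k ≤ M) :
    ∃ u, dl M = u ++ dl k ∧ ∀ c ∈ u, (k : Int) < c := by
  induction M with
  | zero =>
      refine ⟨[], ?_, by simp⟩
      have : k = 0 := Nat.le_zero.mp h
      simp [this]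
  | succ m ih =>
      rcases Nat.eq_or_lt_of_le h with he | hl
      · exact ⟨[], by simp [he], by simp⟩
      · obtain ⟨u, hu, hlt⟩ := ih (Nat.lt_succ_iff.mp hl)
        refine ⟨((m : Int) + 1) :: u, by simp [dl, hu], ?_⟩
        intro c hc
        rcases List.mem_cons.mp hc with rfl | hc
        · have : k ≤ m := Nat.lt_succ_iff.mp hl
          omega
        · exact hlt c hc

lemma flatMap_congr_mem {α β : Type} (l : List α) (f g : α → List β)
    (h : ∀ c ∈ l, f c = g c) : l.flatMap f = l.flatMap g := by
  induction l with
  | nil => rfl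
  | cons y t ih =>
      simp only [List.flatMap_cons, h y (by simp)]
      rw [ih (fun c hc => h c (by simp [hc]))]

-- MASTER: a stable reverse sort by an Int key with values in [1, M] is the
-- concatenation, for each key value in descending order, of the equal-key
-- sublists in original order.
lemma sorted_rev_buckets {α : Type} (key : α → Int) (M : Nat) (l : List α)
    (h : ∀ a ∈ l, 1 ≤ key a ∧ key a ≤ (M : Int)) :
    PySem.List.sorted l key true
      = (dl M).flatMap (fun c => l.filter (fun a => key a == c)) := by
  induction l using List.reverseRecOn with
  | nil => simp [PySem.List.sorted]
  | append_singleton l x ih =>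
      have hb : ∀ a ∈ l, 1 ≤ key a ∧ key a ≤ (M : Int) := fun a ha => h a (by simp [ha])
      obtain ⟨hx1, hx2⟩ := h x (by simp)
      have hL : PySem.List.sorted (l ++ [x]) key true
          = PySem.List.insertBy (fun a b => decide (key b < key a)) x
              (PySem.List.sorted l key true) := by
        rw [PySem.List.sorted_rev_eq_foldl_insertBy (l ++ [x]) key,
            PySem.List.sorted_rev_eq_foldl_insertBy l key, List.foldl_append]
        rfl
      obtain ⟨k, hkx⟩ : ∃ k : Nat, key x = (k : Int) := ⟨(key x).toNat, by omega⟩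
      have hkM : k ≤ M := by omega
      have hk1 : 1 ≤ k := by omega
      obtain ⟨u, hu, hugt⟩ := dl_split M k hkM
      have hdlk : dl k = ((k : Nat) : Int) :: dl (k - 1) := by
        cases k with
        | zero => omega
        | succ m =>
            simp only [dl, Nat.add_sub_cancel]
            push_cast
            simp
      -- the equal-key sublists of l
      set F : Int → List α := fun c => l.filter (fun a => key a == c) with hF
      -- elements of F c have key c
      have hkeyF : ∀ c, ∀ e ∈ F c, key e = c := by
        intro c e he
        have := List.of_mem_filter he
        exact eq_of_beq this
      -- rewrite the RHS buckets of l ++ [x]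
      have hsplit : ∀ c : Int, (l ++ [x]).filter (fun a => key a == c)
          = F c ++ (if key x == c then [x] else []) := by
        intro c
        rw [List.filter_append]
        simp [hF, List.filter_cons, beq_iff_eq]
      have hRHS : (dl M).flatMap (fun c => (l ++ [x]).filter (fun a => key a == c))
          = u.flatMap F ++ ((F (k : Int) ++ [x]) ++ (dl (k - 1)).flatMap F) := by
        rw [flatMap_congr_mem _ _ _ (fun c _ => hsplit c), hu, hdlk]
        rw [List.flatMap_append, List.flatMap_cons]
        have h1 : u.flatMap (fun c => F c ++ (if key x == c then [x] else [])) = u.flatMap F := by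
          apply flatMap_congr_mem
          intro c hc
          have : key x ≠ c := by have := hugt c hc; omega
          simp [this]
        have h2 : (dl (k - 1)).flatMap (fun c => F c ++ (if key x == c then [x] else []))
            = (dl (k - 1)).flatMap F := by
          apply flatMap_congr_mem
          intro c hc
          have hcle := (mem_dl _ c).mp hc
          have : key x ≠ c := by omega
          simp [this]
        rw [h1, h2]
        have : (key x == (k : Int)) = true := by simp [hkx]
        simp [this]
      rw [hRHS, hL, ih hb, hu, hdlk, List.flatMap_append, List.flatMap_cons]
      rw [show u.flatMap F ++ (F (k : Int) ++ (dl (k - 1)).flatMap F)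
            = (u.flatMap F ++ F (k : Int)) ++ (dl (k - 1)).flatMap F by simp]
      rw [insertBy_prefix _ _ _ _ ?pre]
      case pre =>
        intro e he
        rcases List.mem_append.mp he with he | he
        · obtain ⟨c, hc, hec⟩ := List.mem_flatMap.mp he
          have := hkeyF c e hec
          have := hugt c hc
          simp only [decide_eq_false_iff_not, not_lt]
          omega
        · have := hkeyF (k : Int) e he
          simp only [decide_eq_false_iff_not, not_lt]
          omega
      rw [insertBy_all_before _ _ _ ?all]
      case all =>
        intro e he
        obtain ⟨c, hc, hec⟩ := List.mem_flatMap.mp he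
        have := hkeyF c e hec
        have hcle := (mem_dl _ c).mp hc
        simp only [decide_eq_true_eq]
        omega
      simp

-- the setdefault-append fold groups by count, keeping original order
lemma buckets_getD (l : List (String × Int)) (d : PySem.Dict Int (List String)) (c : Int) :
    (l.foldl (fun (d : PySem.Dict Int (List String)) p =>
        d.insert p.2 (d.getD p.2 [] ++ [p.1])) d).getD c []
      = d.getD c [] ++ (l.filter (fun p => p.2 == c)).map (fun p => p.1) := by
  induction l generalizing d with
  | nil => simp
  | cons p t ih =>
      rw [List.foldl_cons, ih]
      by_cases hc : p.2 = c
      · rw [PySem.Dict.getD_insert]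
        simp [hc]
      · rw [PySem.Dict.getD_insert]
        have : (p.2 == c) = false := by simp [hc]
        simp [Ne.symm hc, this]

lemma dl_eq_pyRange_append (a b : Nat) (h : b ≤ a) :
    dl a = PySem.List.pyRange (a : Int) (b : Int) (-1) ++ dl b := by
  induction a, h using Nat.le_induction with
  | base =>
      rw [PySem.List.pyRange_neg_one]
      simp
  | succ m hbm ih =>
      have hstep : PySem.List.pyRange ((m + 1 : Nat) : Int) (b : Int) (-1)
          = ((m + 1 : Nat) : Int) :: PySem.List.pyRange (m : Nat) (b : Int) (-1) := by
        rw [PySem.List.pyRange_neg_one, PySem.List.pyRange_neg_one]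
        have h1 : (((m + 1 : Nat) : Int) - (b : Int)).toNat = (m - b) + 1 := by omega
        have h2 : (((m : Nat) : Int) - (b : Int)).toNat = m - b := by omega
        rw [h1, h2, List.range_succ_eq_map]
        simp only [List.map_cons, List.map_map]
        refine congrArg₂ _ (by push_cast; ring) (List.map_congr_left ?_)
        intro j _
        simp only [Function.comp_apply]
        push_cast
        ring
      rw [hstep]
      have : dl (m + 1) = ((m + 1 : Nat) : Int) :: dl m := by
        simp only [dl]
        push_cast
        simp
      rw [this, ih, List.cons_append]

lemma filter_flatMap' {α β : Type} (l : List α) (f : α → List β) (p : β → Bool) :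
    (l.flatMap f).filter p = l.flatMap (fun c => (f c).filter p) := by
  induction l with
  | nil => rfl
  | cons y t ih => simp [List.flatMap_cons, List.filter_append, ih]

lemma mem_pyRange_desc (a b c : Int) (hc : c ∈ PySem.List.pyRange a b (-1)) :
    b < c ∧ c ≤ a := by
  rw [PySem.List.pyRange_neg_one] at hc
  obtain ⟨j, hj, rfl⟩ := List.mem_map.mp hc
  have := List.mem_range.mp hj
  omega

-- the lists A slices and B slices are equal
lemma lists_eq (words : List String) (min_freq : Int) :
    ((PySem.List.sorted (PySem.Dict.counter words).items (fun p => p.2) true).filter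
        (fun p => decide (min_freq ≤ p.2) && decide (2 < PySem.Str.len p.1))).map (fun p => p.1)
    = (PySem.List.pyRange (PySem.List.maxD (PySem.Dict.counter words).values (fun v => v) 0)
          (max min_freq 1 - 1) (-1)).foldl
        (fun acc c => acc ++ (((PySem.Dict.counter words).items.foldl
            (fun (d : PySem.Dict Int (List String)) p => d.insert p.2 (d.getD p.2 [] ++ [p.1]))
            PySem.Dict.empty).getD c []).filter (fun w => decide (2 < PySem.Str.len w))) [] := by
  set P : String × Int → Bool :=
    (fun p => decide (min_freq ≤ p.2) && decide (2 < PySem.Str.len p.1)) with hP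
  set items := (PySem.Dict.counter words).items with hitems
  set M' := PySem.List.maxD (PySem.Dict.counter words).values (fun v => v) 0 with hM'
  have hvals : (PySem.Dict.counter words).values = items.map (fun p => p.2) := rfl
  have hval_ge1 : ∀ v ∈ (PySem.Dict.counter words).values, 1 ≤ v := by
    intro v hv
    rw [hvals] at hv
    obtain ⟨p, hp, rfl⟩ := List.mem_map.mp hv
    rw [hitems, PySem.Dict.items_counter] at hp
    obtain ⟨k, hk, rfl⟩ := List.mem_map.mp hp
    have hkw : k ∈ words := (PySem.Set.mem_ofList words k).mp hk
    have := List.count_pos_iff.mpr hkw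
    simp only []
    omega
  have hM0 : 0 ≤ M' := by
    rw [hM']
    unfold PySem.List.maxD
    cases hmx : PySem.List.max? (PySem.Dict.counter words).values (fun v => v) with
    | none => simp
    | some m =>
        have hm := PySem.List.max?_mem hmx
        have := hval_ge1 m hm
        simp only [Option.getD_some]
        omega
  have hbound : ∀ p ∈ items, 1 ≤ p.2 ∧ p.2 ≤ M' := by
    intro p hp
    have h2 : p.2 ∈ (PySem.Dict.counter words).values := by
      rw [hvals]; exact List.mem_map_of_mem hp
    refine ⟨hval_ge1 _ h2, ?_⟩
    cases hmx : PySem.List.max? (PySem.Dict.counter words).values (fun v => v) with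
    | none =>
        rw [PySem.List.max?_eq_none_iff] at hmx
        rw [hmx] at h2
        simp at h2
    | some m =>
        have hle := PySem.List.max?_isMax hmx p.2 h2
        have hMm : M' = m := by rw [hM']; unfold PySem.List.maxD; rw [hmx]; rfl
        omega
  obtain ⟨M, hMM⟩ : ∃ M : Nat, (M : Int) = M' := ⟨M'.toNat, by omega⟩
  -- B side: foldl → flatMap, buckets → filtered sublists
  rw [PySem.List.foldl_append_eq_flatMap, List.nil_append]
  simp only [buckets_getD, PySem.Dict.getD_empty, List.nil_append, List.filter_map]
  -- A side: stable reverse sort = descending buckets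
  rw [sorted_rev_buckets (fun p => p.2) M items (by intro a ha; have h := hbound a ha; exact ⟨h.1, show a.2 ≤ (M:Int) by omega⟩)]
  rw [filter_flatMap', List.map_flatMap]
  by_cases hcase : max min_freq 1 - 1 ≤ M'
  · obtain ⟨b, hbb⟩ : ∃ b : Nat, (b : Int) = max min_freq 1 - 1 := by
      refine ⟨(max min_freq 1 - 1).toNat, ?_⟩
      omega
    rw [dl_eq_pyRange_append M b (by omega), List.flatMap_append, hMM, hbb]
    have h2nil : (dl b).flatMap
        (fun c => ((items.filter (fun a => a.2 == c)).filter P).map (fun p => p.1)) = [] := by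
      rw [flatMap_congr_mem (dl b) _ (fun _ => ([] : List String)) ?_]
      · simp
      · intro c hc
        have hcb := (mem_dl b c).mp hc
        have hfil : (items.filter (fun a => a.2 == c)).filter P = [] := by
          rw [List.filter_eq_nil_iff]
          intro p hp
          have hpc : p.2 = c := eq_of_beq (List.mem_filter.mp hp).2
          have hmf : ¬ (min_freq ≤ p.2) := by omega
          simp [hP, hmf]
        rw [hfil, List.map_nil]
    rw [h2nil, List.append_nil]
    apply flatMap_congr_mem
    intro c hc
    obtain ⟨hlt, hle⟩ := mem_pyRange_desc _ _ _ hc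
    have hfc : (items.filter (fun a => a.2 == c)).filter P
        = (items.filter (fun a => a.2 == c)).filter
            (fun p => decide (2 < PySem.Str.len p.1)) := by
      apply List.filter_congr
      intro p hp
      have hpc : p.2 = c := eq_of_beq (List.mem_filter.mp hp).2
      have hmf : min_freq ≤ p.2 := by omega
      simp [hP, hmf]
    rw [hfc]
    simp [Function.comp]
  · have hrange : PySem.List.pyRange M' (max min_freq 1 - 1) (-1) = [] := by
      rw [PySem.List.pyRange_neg_one]
      have : (M' - (max min_freq 1 - 1)).toNat = 0 := by omega
      rw [this]
      rfl
    rw [hrange, List.flatMap_nil]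
    rw [flatMap_congr_mem (dl M) _ (fun _ => ([] : List String)) ?_]
    · simp
    · intro c hc
      have hcb := (mem_dl M c).mp hc
      have hfil : (items.filter (fun a => a.2 == c)).filter P = [] := by
        rw [List.filter_eq_nil_iff]
        intro p hp
        have hpc : p.2 = c := eq_of_beq (List.mem_filter.mp hp).2
        have hmf : ¬ (min_freq ≤ p.2) := by omega
        simp [hP, hmf]
      rw [hfil, List.map_nil]

-- ===== VERDICT (by name: the statement is the Claim_ definition above) =====
theorem select_vocabulary_py_spec : Claim_equal_select_vocabulary_py := by
  intro words min_freq max_words _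
  unfold Spec_select_vocabulary_py select_vocabulary_py select_vocabulary_py_alt
  exact congrArg (fun L => PySem.List.slice L none (some max_words)) (lists_eq words min_freq)
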